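-- pv_equiv track=rewrite | github.com/davidvergarafuentes-koko/bts-bdp-assignment | bdi_api/s1/exercise.py | _first_n_filenames
-- ===== SOURCE A (Python) =====
-- def _first_n_filenames(file_limit: int) -> list[str]:
--     """
--     Generates the first N filenames in ascending order, starting at 00:00:00Z
--     with 5-second increments:
--       000000Z.json.gz, 000005Z.json.gz, 000010Z.json.gz, ...
--     """
--     out: list[str] = []
--     for i in range(int(file_limit)):
--         total_seconds = i * 5
--         hh = total_seconds // 3600
--         mm = (total_seconds % 3600) // 60
--         ss = total_seconds % 60
--         out.append(f"{hh:02d}{mm:02d}{ss:02d}Z.json.gz")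
--     return out
-- ===== SOURCE B (Python) =====
-- def _first_n_filenames(file_limit: int) -> list[str]:
--     """
--     Same output as A: first N filenames at 5-second increments, but kept with
--     running hh/mm/ss counters and explicit carry propagation instead of
--     recomputing div/mod from i*5 on each iteration.
--     """
--     out: list[str] = []
--     hh = mm = ss = 0
--     for _ in range(int(file_limit)):
--         out.append(f"{hh:02d}{mm:02d}{ss:02d}Z.json.gz")
--         ss += 5
--         if ss >= 60:
--             ss -= 60
--             mm += 1
--             if mm >= 60:
--                 mm -= 60
--                 hh += 1
--     return out
-- ===== Notes on version B (the rewrite author's own statement) =====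
-- stated objective: alternative
-- what changed: B replaces the per-iteration div/mod decomposition of the running second count into hh/mm/ss with three counters updated by a fixed increment and explicit carry propagation (ss into mm into hh), never dividing; hh is deliberately uncapped so outputs match A beyond a full day.
import Mathlib
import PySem

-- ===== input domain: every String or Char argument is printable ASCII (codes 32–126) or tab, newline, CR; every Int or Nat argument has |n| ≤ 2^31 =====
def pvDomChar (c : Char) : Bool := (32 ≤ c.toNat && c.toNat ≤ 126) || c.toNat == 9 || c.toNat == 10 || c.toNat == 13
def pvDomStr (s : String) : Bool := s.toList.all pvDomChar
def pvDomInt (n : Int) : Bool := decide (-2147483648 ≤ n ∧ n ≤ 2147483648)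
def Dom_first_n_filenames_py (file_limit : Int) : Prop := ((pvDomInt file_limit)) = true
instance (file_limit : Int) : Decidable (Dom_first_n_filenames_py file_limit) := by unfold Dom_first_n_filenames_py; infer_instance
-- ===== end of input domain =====

-- B replaces A's per-iteration div/mod decomposition with running hh/mm/ss counters and carry propagation.

-- ===== PORT A =====
-- f"{n:02d}" for n ≥ 0 (the only case reached): pad str(n) to width 2 with a leading '0'
def pvFmt2 (n : Int) : String := if n < 10 then "0" ++ PySem.Int.toStr n else PySem.Int.toStr n

def first_n_filenames_py (file_limit : Int) : List String :=
  (PySem.List.pyRange 0 file_limit 1).foldl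
    (fun out i =>
      let total_seconds := i * 5
      let hh := PySem.Int.floordiv total_seconds 3600
      let mm := PySem.Int.floordiv (PySem.Int.mod total_seconds 3600) 60
      let ss := PySem.Int.mod total_seconds 60
      out ++ [pvFmt2 hh ++ pvFmt2 mm ++ pvFmt2 ss ++ "Z.json.gz"]) []

-- ===== PORT B =====
-- the loop of Source B: n remaining iterations, current counters hh mm ss
def pvAltLoop : Nat → Int → Int → Int → List String
  | 0, _, _, _ => []
  | n+1, hh, mm, ss =>
    (pvFmt2 hh ++ pvFmt2 mm ++ pvFmt2 ss ++ "Z.json.gz") ::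
      (let ss' := ss + 5
       if ss' ≥ 60 then
         (let mm' := mm + 1
          if mm' ≥ 60 then pvAltLoop n (hh + 1) (mm' - 60) (ss' - 60)
          else pvAltLoop n hh mm' (ss' - 60))
       else pvAltLoop n hh mm ss')

def first_n_filenames_py_alt (file_limit : Int) : List String :=
  pvAltLoop file_limit.toNat 0 0 0

-- ===== PRECONDITION & SPEC =====
def Spec_first_n_filenames_py (file_limit : Int) (out : List String) : Prop := out = first_n_filenames_py_alt file_limit
instance (file_limit : Int) (out : List String) : Decidable (Spec_first_n_filenames_py file_limit out) := by unfold Spec_first_n_filenames_py; infer_instance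

-- ===== CLAIM (what is proved, stated in full; the proofs are below) =====
def Claim_equal_first_n_filenames_py : Prop := ∀ (file_limit : Int), Dom_first_n_filenames_py file_limit → Spec_first_n_filenames_py file_limit (first_n_filenames_py file_limit)

-- ===== LEMMAS AND PROOFS =====

-- the filename for an absolute second count t ≥ 0, as A computes it
def pvName (t : Int) : String :=
  pvFmt2 (PySem.Int.floordiv t 3600) ++ pvFmt2 (PySem.Int.floordiv (PySem.Int.mod t 3600) 60)
    ++ pvFmt2 (PySem.Int.mod t 60) ++ "Z.json.gz"

-- reference list: names for t, t+5, …, t+5(n-1)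
def pvRef : Nat → Int → List String
  | 0, _ => []
  | n+1, t => pvName t :: pvRef n (t + 5)

theorem pvA_fold (n : Nat) : ∀ (a : Int) (acc : List String), 0 ≤ a →
    (PySem.List.pyRange a (a + n) 1).foldl
      (fun out i =>
        out ++ [pvFmt2 (PySem.Int.floordiv (i * 5) 3600)
          ++ pvFmt2 (PySem.Int.floordiv (PySem.Int.mod (i * 5) 3600) 60)
          ++ pvFmt2 (PySem.Int.mod (i * 5) 60) ++ "Z.json.gz"]) acc
      = acc ++ pvRef n (a * 5) := by
  induction n with
  | zero => intro a acc _; rw [show a + (0:Nat) = a by simp, PySem.List.pyRange_one_eq_nil le_rfl]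
            simp [pvRef]
  | succ k ih =>
    intro a acc ha
    rw [PySem.List.pyRange_one_cons (by push_cast; omega)]
    have : a + ((k:Int) + 1) = (a + 1) + k := by ring
    simp only [List.foldl_cons, Nat.cast_succ, this]
    rw [ih (a + 1) _ (by omega)]
    simp [pvRef, pvName, show (a + 1) * 5 = a * 5 + 5 by ring, List.append_assoc]

theorem pvName_eq (hh mm ss : Int) (_hh0 : 0 ≤ hh) (hm : 0 ≤ mm ∧ mm < 60) (hs : 0 ≤ ss ∧ ss < 60) :
    pvName (hh * 3600 + mm * 60 + ss) = pvFmt2 hh ++ pvFmt2 mm ++ pvFmt2 ss ++ "Z.json.gz" := by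
  unfold pvName
  rw [PySem.Int.floordiv_eq_ediv_of_pos (by omega), PySem.Int.mod_eq_emod_of_pos (a := hh * 3600 + mm * 60 + ss) (by omega),
      PySem.Int.mod_eq_emod_of_pos (by omega)]
  have h1 : (hh * 3600 + mm * 60 + ss) / 3600 = hh := by omega
  have h2 : (hh * 3600 + mm * 60 + ss) % 3600 = mm * 60 + ss := by omega
  have h3 : (hh * 3600 + mm * 60 + ss) % 60 = ss := by omega
  rw [h1, h2, h3, PySem.Int.floordiv_eq_ediv_of_pos (by omega)]
  have h4 : (mm * 60 + ss) / 60 = mm := by omega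
  rw [h4]

theorem pvB_loop (n : Nat) : ∀ (hh mm ss : Int), 0 ≤ hh → 0 ≤ mm → mm < 60 → 0 ≤ ss → ss < 60 →
    pvAltLoop n hh mm ss = pvRef n (hh * 3600 + mm * 60 + ss) := by
  induction n with
  | zero => intro hh mm ss _ _ _ _ _; rfl
  | succ k ih =>
    intro hh mm ss hh0 hm0 hm1 hs0 hs1
    unfold pvAltLoop pvRef
    rw [pvName_eq hh mm ss hh0 ⟨hm0, hm1⟩ ⟨hs0, hs1⟩]
    congr 1
    by_cases h1 : ss + 5 ≥ 60
    · by_cases h2 : mm + 1 ≥ 60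
      · simp only [h1, h2, if_pos]
        rw [ih (hh + 1) (mm + 1 - 60) (ss + 5 - 60) (by omega) (by omega) (by omega) (by omega) (by omega)]
        congr 1; ring_nf
      · simp only [h1, if_pos, if_neg h2]
        rw [ih hh (mm + 1) (ss + 5 - 60) hh0 (by omega) (by omega) (by omega) (by omega)]
        congr 1; ring_nf
    · simp only [if_neg h1]
      rw [ih hh mm (ss + 5) hh0 hm0 hm1 (by omega) (by omega)]
      congr 1; ring

-- ===== VERDICT (by name: the statement is the Claim_ definition above) =====
theorem first_n_filenames_py_spec : Claim_equal_first_n_filenames_py := by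
  intro fl _
  unfold Spec_first_n_filenames_py first_n_filenames_py first_n_filenames_py_alt
  rw [pvB_loop fl.toNat 0 0 0 le_rfl le_rfl (by omega) le_rfl (by omega)]
  have h : fl = 0 + (fl.toNat : Int) ∨ fl < 0 := by omega
  rcases h with h | h
  · conv_lhs => rw [h]
    rw [pvA_fold fl.toNat 0 [] le_rfl]
    norm_num
  · rw [PySem.List.pyRange_one_eq_nil (by omega)]
    have : fl.toNat = 0 := by omega
    rw [this]; rfl
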